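-- pv_equiv track=rewrite | github.com/crossback2000/python-coding-test | problems/35.py | shortest_path_collect_all
-- ===== SOURCE A (Python) =====
-- from collections import deque
-- from typing import Dict, List, Tuple
--
-- Grid = List[str]
--
-- Point = Tuple[int, int]
--
-- def bfs_shortest(grid: Grid, start: Point) -> Dict[Point, int]:
--     """주어진 시작점에서 모든 도달 가능한 칸까지의 최단 거리를 구한다."""
--
--     rows, cols = len(grid), len(grid[0])
--     queue: deque[Point] = deque([start])
--     distance = {start: 0}
--     directions = [(1, 0), (-1, 0), (0, 1), (0, -1)]
--
--     while queue:
--         r, c = queue.popleft()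
--         for dr, dc in directions:
--             nr, nc = r + dr, c + dc
--             # 격자 범위 내이고 벽이 아니며 아직 방문하지 않았다면 이동한다.
--             if 0 <= nr < rows and 0 <= nc < cols and grid[nr][nc] != "#" and (nr, nc) not in distance:
--                 distance[(nr, nc)] = distance[(r, c)] + 1
--                 queue.append((nr, nc))
--     return distance
--
-- def shortest_path_collect_all(grid: Grid) -> int:
--     """모든 체크포인트를 방문하는 최단 거리를 구한다."""
--
--     rows, cols = len(grid), len(grid[0])
--
--     # 시작점과 체크포인트를 찾는다.
--     checkpoints: List[Point] = []
--     start: Point = (-1, -1)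
--     for r in range(rows):
--         for c in range(cols):
--             if grid[r][c] == "S":
--                 start = (r, c)
--             elif grid[r][c] == "X":
--                 checkpoints.append((r, c))
--
--     # 시작점을 checkpoints 리스트의 맨 앞에 넣어 인덱스를 맞춘다.
--     all_points = [start] + checkpoints
--     k = len(all_points)
--
--     # 모든 포인트 쌍 사이 최단 거리를 BFS로 구한다.
--     dist_matrix = [[-1] * k for _ in range(k)]
--     for i, point in enumerate(all_points):
--         distances = bfs_shortest(grid, point)
--         for j, other in enumerate(all_points):
--             dist_matrix[i][j] = distances.get(other, -1)
--
--     # 비연결인 경우는 주어지지 않는다고 했지만, 방어적으로 체크한다.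
--     for i in range(k):
--         for j in range(k):
--             if dist_matrix[i][j] == -1:
--                 raise ValueError("체크포인트가 서로 도달 불가합니다")
--
--     # 비트마스크 DP: dp[mask][i]는 mask 상태에서 i 위치에 있을 때의 최소 거리
--     total_mask = 1 << k
--     INF = 10 ** 12
--     dp = [[INF] * k for _ in range(total_mask)]
--
--     # 시작점은 index 0, 방문 비트마스크도 1 << 0 으로 초기화
--     dp[1][0] = 0
--
--     for mask in range(total_mask):
--         for i in range(k):
--             if dp[mask][i] == INF:
--                 continue
--             # i에서 다른 포인트 j로 이동하여 방문하지 않은 비트를 추가한다.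
--             for j in range(1, k):  # 체크포인트만 순회 (0은 시작점)
--                 next_bit = 1 << j
--                 if mask & next_bit:
--                     continue  # 이미 방문
--                 next_mask = mask | next_bit
--                 candidate = dp[mask][i] + dist_matrix[i][j]
--                 if candidate < dp[next_mask][j]:
--                     dp[next_mask][j] = candidate
--
--     # 모든 체크포인트를 방문한 상태(mask == (1<<k)-1)에서의 최소 값을 찾는다.
--     full_mask = total_mask - 1
--     return min(dp[full_mask])
-- ===== SOURCE B (Python) =====
-- from collections import deque
-- from functools import lru_cache
-- from typing import Dict, List, Tuple
--
-- Grid = List[str]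
-- Point = Tuple[int, int]
--
--
-- def bfs_shortest(grid: Grid, start: Point) -> Dict[Point, int]:
--     # BFS over a growing list with a read pointer instead of a deque.
--     rows, cols = len(grid), len(grid[0])
--     order: List[Point] = [start]
--     distance = {start: 0}
--     i = 0
--     while i < len(order):
--         r, c = order[i]
--         i += 1
--         for dr, dc in [(1, 0), (-1, 0), (0, 1), (0, -1)]:
--             nr, nc = r + dr, c + dc
--             if 0 <= nr < rows and 0 <= nc < cols and grid[nr][nc] != "#" and (nr, nc) not in distance:
--                 distance[(nr, nc)] = distance[(r, c)] + 1
--                 order.append((nr, nc))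
--     return distance
--
--
-- def shortest_path_collect_all(grid: Grid) -> int:
--     rows, cols = len(grid), len(grid[0])
--
--     checkpoints: List[Point] = []
--     start: Point = (-1, -1)
--     for r in range(rows):
--         for c in range(cols):
--             if grid[r][c] == "S":
--                 start = (r, c)
--             elif grid[r][c] == "X":
--                 checkpoints.append((r, c))
--
--     all_points = [start] + checkpoints
--     k = len(all_points)
--
--     # Build the distance matrix row by row, checking reachability as we go.
--     dist_matrix: List[List[int]] = []
--     for point in all_points:
--         distances = bfs_shortest(grid, point)
--         row = [distances.get(other, -1) for other in all_points]
--         if -1 in row: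
--             raise ValueError("체크포인트가 서로 도달 불가합니다")
--         dist_matrix.append(row)
--
--     INF = 10 ** 12
--
--     # Top-down memoized Held-Karp: cheapest walk from the start (index 0) that
--     # visits exactly the points of `mask` and ends at `last`.
--     @lru_cache(maxsize=None)
--     def solve(mask: int, last: int) -> int:
--         if last == 0:
--             return 0 if mask == 1 else INF
--         if not (mask >> last) & 1:
--             return INF
--         sub = mask ^ (1 << last)
--         best = INF
--         for prev in range(k):
--             if not (sub >> prev) & 1:
--                 continue
--             v = solve(sub, prev)
--             if v == INF:
--                 continue
--             cand = v + dist_matrix[prev][last]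
--             if cand < best:
--                 best = cand
--         return best
--
--     full_mask = (1 << k) - 1
--     return min(solve(full_mask, last) for last in range(k))
-- ===== Notes on version B (the rewrite author's own statement) =====
-- stated objective: alternative
-- what changed: B replaces the deque-based BFS by a growing-list-with-read-pointer BFS, builds each distance-matrix row with an inline '-1 in row' reachability check instead of building the full matrix and re-scanning it, and replaces the bottom-up bitmask-DP sweep over all 2^k masks by a top-down memoized recursive Held-Karp solve(mask,last) answered as min over last of solve(full_mask,last).
import Mathlib
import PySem

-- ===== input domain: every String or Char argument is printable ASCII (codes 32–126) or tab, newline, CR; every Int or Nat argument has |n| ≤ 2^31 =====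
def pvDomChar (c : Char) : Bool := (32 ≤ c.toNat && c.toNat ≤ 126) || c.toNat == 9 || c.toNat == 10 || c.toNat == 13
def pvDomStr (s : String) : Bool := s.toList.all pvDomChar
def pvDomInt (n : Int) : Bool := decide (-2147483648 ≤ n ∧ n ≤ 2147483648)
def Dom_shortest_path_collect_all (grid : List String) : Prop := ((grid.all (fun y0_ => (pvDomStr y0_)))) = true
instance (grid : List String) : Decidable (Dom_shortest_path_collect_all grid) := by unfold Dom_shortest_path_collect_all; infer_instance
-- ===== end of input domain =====

-- B replaces the deque BFS by a growing-list/read-pointer BFS, builds each matrix row with an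
-- inline -1 reachability check, and replaces the bottom-up bitmask DP by a recursive top-down
-- Held-Karp (objective: alternative).
-- Where Python A raises (ValueError/IndexError) both ports return the sentinel -1; Pre_ excludes those inputs.

-- ===== PORT A =====
def pvINF : Int := 10 ^ 12

-- grid[r][c] as Python reads it (both sources index identically; default is irrelevant inside Pre_)
def pvCellI (grid : List String) (r c : Int) : Char :=
  (((PySem.List.pyGet? grid r).getD "").toList.getD c.toNat ' ')

-- the body of the inner `for dr, dc in directions` loop — textually identical in Source A and Source B,
-- so both ports fold this one step function
def pvDirStep (grid : List String) (rows cols r c : Int)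
    (s : List (Int × Int) × PySem.Dict (Int × Int) Int) (dd : Int × Int) :
    List (Int × Int) × PySem.Dict (Int × Int) Int :=
  let nr := r + dd.1
  let nc := c + dd.2
  if 0 ≤ nr ∧ nr < rows ∧ 0 ≤ nc ∧ nc < cols ∧ pvCellI grid nr nc ≠ '#' ∧
      s.2.contains (nr, nc) = false then
    (s.1 ++ [(nr, nc)], s.2.insert (nr, nc) (s.2.getD (r, c) 0 + 1))
  else s

-- bfs_shortest (A): deque + distance dict; fuel rows*cols+1 bounds the number of dequeues (totality guard only)
def pvBfsLoop (grid : List String) (rows cols : Int) :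
    Nat → List (Int × Int) → PySem.Dict (Int × Int) Int → PySem.Dict (Int × Int) Int
  | 0, _, dist => dist
  | _ + 1, [], dist => dist
  | fuel + 1, (r, c) :: q, dist =>
      let st := [((1:Int),(0:Int)),(-1,0),(0,1),(0,-1)].foldl (pvDirStep grid rows cols r c) (q, dist)
      pvBfsLoop grid rows cols fuel st.1 st.2

def pvBfs (grid : List String) (start : Int × Int) : PySem.Dict (Int × Int) Int :=
  let rows : Int := grid.length
  let cols : Int := ((PySem.List.pyGet? grid 0).getD "").toList.length
  pvBfsLoop grid rows cols (grid.length * cols.toNat + 1) [start]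
    (PySem.Dict.insert PySem.Dict.empty start 0)

-- the scan for 'S' (last wins) and the 'X' checkpoints, row-major (identical loop in Source A and Source B)
def pvFindPoints (grid : List String) : (Int × Int) × List (Int × Int) :=
  let rows := grid.length
  let cols := ((PySem.List.pyGet? grid 0).getD "").toList.length
  (List.range rows).foldl (fun st r =>
    (List.range cols).foldl (fun st c =>
      if pvCellI grid r c = 'S' then (((r : Int), (c : Int)), st.2)
      else if pvCellI grid r c = 'X' then (st.1, st.2 ++ [((r : Int), (c : Int))])
      else st) st) ((-1, -1), [])

def pvPoints (grid : List String) : List (Int × Int) :=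
  (pvFindPoints grid).1 :: (pvFindPoints grid).2

def pvMatrix (grid : List String) : List (List Int) :=
  (pvPoints grid).map (fun p =>
    let ds := pvBfs grid p
    (pvPoints grid).map (fun q => ds.getD q (-1)))

-- the defensive check: Python A raises ValueError iff some entry is -1
def pvHasNeg (mat : List (List Int)) : Bool := mat.any (fun row => row.any (fun v => v == -1))

def pvD (mat : List (List Int)) (i j : Nat) : Int := (mat.getD i []).getD j (-1)

-- the DP table: a boxed lookup function (the box stops Lean's eta-over-application
-- from re-executing update bodies at every lookup; the values are unchanged)
structure PvTbl where
  get : Nat → Nat → Int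

def pvDp0 : PvTbl := ⟨fun M i => if M = 1 ∧ i = 0 then 0 else pvINF⟩

def pvRelax (d : Nat → Nat → Int) (mask i : Nat) (dp : PvTbl) (j : Nat) : PvTbl :=
  if Nat.testBit mask j then dp
  else
    let cand := dp.get mask i + d i j
    if cand < dp.get (mask ||| (1 <<< j)) j then
      ⟨fun M x => if M = mask ||| (1 <<< j) ∧ x = j then cand else dp.get M x⟩
    else dp

def pvStepI (d : Nat → Nat → Int) (k mask : Nat) (dp : PvTbl) (i : Nat) : PvTbl :=
  if dp.get mask i = pvINF then dp else (List.range' 1 (k - 1)).foldl (pvRelax d mask i) dp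

def pvStepMask (d : Nat → Nat → Int) (k : Nat) (dp : PvTbl) (mask : Nat) : PvTbl :=
  (List.range k).foldl (pvStepI d k mask) dp

def pvDpF (d : Nat → Nat → Int) (k : Nat) : PvTbl :=
  (List.range (1 <<< k)).foldl (pvStepMask d k) pvDp0

def shortest_path_collect_all (grid : List String) : Int :=
  let mat := pvMatrix grid
  if pvHasNeg mat then -1          -- Python raises ValueError here (outside Pre_)
  else
    let k := (pvPoints grid).length
    let dp := pvDpF (pvD mat) k
    ((PySem.List.min? ((List.range k).map (fun i => dp.get ((1 <<< k) - 1) i)) (fun v => v)).getD 0)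

-- ===== PORT B =====
-- bfs_shortest (B): a growing list `order` with a read pointer i instead of a deque;
-- `while i < len(order)` stops when pyGet? order i misses (i only grows, so this is exact)
def pvBfsBLoop (grid : List String) (rows cols : Int) :
    Nat → List (Int × Int) → Nat → PySem.Dict (Int × Int) Int → PySem.Dict (Int × Int) Int
  | 0, _, _, dist => dist
  | fuel + 1, order, i, dist =>
      match PySem.List.pyGet? order (i : Int) with
      | none => dist
      | some (r, c) =>
          let st := [((1:Int),(0:Int)),(-1,0),(0,1),(0,-1)].foldl (pvDirStep grid rows cols r c) (order, dist)
          pvBfsBLoop grid rows cols fuel st.1 (i + 1) st.2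

def pvBfsB (grid : List String) (start : Int × Int) : PySem.Dict (Int × Int) Int :=
  let rows : Int := grid.length
  let cols : Int := ((PySem.List.pyGet? grid 0).getD "").toList.length
  pvBfsBLoop grid rows cols (grid.length * cols.toNat + 1) [start] 0
    (PySem.Dict.insert PySem.Dict.empty start 0)

-- matrix rows built one at a time, aborting (Python: raise ValueError) as soon as a row holds -1
def pvRowsB (grid : List String) (pts : List (Int × Int)) : Option (List (List Int)) :=
  pts.foldl (fun acc p =>
    match acc with
    | none => none
    | some rs =>
        let ds := pvBfsB grid p
        let row := pts.map (fun q => ds.getD q (-1))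
        if row.contains (-1) then none else some (rs ++ [row])) (some [])

-- top-down recursive Held-Karp (Source B memoizes with lru_cache; memoization does not change values)
def pvSolve (d : Nat → Nat → Int) (k : Nat) (mask last : Nat) : Int :=
  if last = 0 then (if mask = 1 then 0 else pvINF)
  else if h : Nat.testBit mask last then
    let sub := mask ^^^ (1 <<< last)
    (List.range k).foldl (fun best prev =>
      if Nat.testBit sub prev = false then best
      else
        let v := pvSolve d k sub prev
        if v = pvINF then best
        else if v + d prev last < best then v + d prev last else best) pvINF
  else pvINF
termination_by mask
decreasing_by
  have : Nat.testBit (mask ^^^ (1 <<< last)) last = false := by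
    simp [Nat.testBit_xor, h, Nat.one_shiftLeft]
  exact Nat.lt_of_testBit last this h (fun j hj => by
    simp [Nat.testBit_xor, Nat.one_shiftLeft, Nat.testBit_two_pow_of_ne (Nat.ne_of_lt hj)])

def shortest_path_collect_all_alt (grid : List String) : Int :=
  let pts := pvPoints grid
  match pvRowsB grid pts with
  | none => -1                     -- Python raises ValueError here (outside Pre_)
  | some mat =>
      let k := pts.length
      ((PySem.List.min? ((List.range k).map (fun last =>
        pvSolve (fun i j => (mat.getD i []).getD j (-1)) k ((1 <<< k) - 1) last)) (fun v => v)).getD 0)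

-- ===== PRECONDITION & SPEC =====
-- Pre-side helpers (closed-form connectivity; not used by either port)
def pvColsN (grid : List String) : Nat := (grid.headD "").toList.length

def pvCellN (grid : List String) (r c : Nat) : Char := ((grid.getD r "").toList.getD c ' ')

def pvOpenN (grid : List String) (p : Nat × Nat) : Bool :=
  p.1 < grid.length && p.2 < pvColsN grid && pvCellN grid p.1 p.2 != '#'

def pvNbrs (p : Nat × Nat) : List (Nat × Nat) :=
  [(p.1 + 1, p.2), (p.1, p.2 + 1)] ++ (if 0 < p.1 then [(p.1 - 1, p.2)] else []) ++
    (if 0 < p.2 then [(p.1, p.2 - 1)] else [])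

def pvGrow (grid : List String) (s : List (Nat × Nat)) : List (Nat × Nat) :=
  s.foldl (fun acc p =>
    (pvNbrs p).foldl (fun acc q =>
      if pvOpenN grid q && !(acc.contains q) then acc ++ [q] else acc) acc) s

def pvReach (grid : List String) (st : Nat × Nat) : List (Nat × Nat) :=
  (pvGrow grid)^[grid.length * pvColsN grid] [st]

def pvSpecials (grid : List String) : Option (Nat × Nat) × List (Nat × Nat) :=
  (List.range grid.length).foldl (fun st r =>
    (List.range (pvColsN grid)).foldl (fun st c =>
      if pvCellN grid r c = 'S' then (some (r, c), st.2)
      else if pvCellN grid r c = 'X' then (st.1, st.2 ++ [(r, c)])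
      else st) st) (none, [])

def pvPreB (grid : List String) : Bool :=
  !grid.isEmpty &&
  grid.all (fun s => pvColsN grid ≤ s.toList.length) &&
  ((pvSpecials grid).2.isEmpty ||
    (match (pvSpecials grid).1 with
     | none => false
     | some st => (pvSpecials grid).2.all (fun x => (pvReach grid st).contains x)))

-- Pre_ = exactly the inputs where Python A returns: the grid is nonempty, no row is shorter than row 0
-- (else IndexError), and every 'X' is connected to the (last) 'S' through non-'#' cells (else the
-- defensive check raises ValueError); there are no other raises.
def Pre_shortest_path_collect_all (grid : List String) : Prop := pvPreB grid = true
instance (grid : List String) : Decidable (Pre_shortest_path_collect_all grid) := by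
  unfold Pre_shortest_path_collect_all; infer_instance

def pvWitness_shortest_path_collect_all : List String := ["SX"]

def Spec_shortest_path_collect_all (grid : List String) (out : Int) : Prop := out = shortest_path_collect_all_alt grid
instance (grid : List String) (out : Int) : Decidable (Spec_shortest_path_collect_all grid out) := by unfold Spec_shortest_path_collect_all; infer_instance

-- ===== CLAIM (what is proved, stated in full; the proofs are below) =====
def Claim_equal_shortest_path_collect_all : Prop := ∀ (grid : List String), Dom_shortest_path_collect_all grid → Pre_shortest_path_collect_all grid → Spec_shortest_path_collect_all grid (shortest_path_collect_all grid)

-- ===== LEMMAS AND PROOFS =====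

-- ---- BFS: the pointer loop equals the deque loop ----
theorem pv_fold_dirs_shift (grid : List String) (rows cols r c : Int)
    (l : List (Int × Int)) :
    ∀ (o q : List (Int × Int)) (d : PySem.Dict (Int × Int) Int) (n : Nat),
      n ≤ o.length → q = o.drop n →
      (l.foldl (pvDirStep grid rows cols r c) (o, d)).2
          = (l.foldl (pvDirStep grid rows cols r c) (q, d)).2 ∧
      (l.foldl (pvDirStep grid rows cols r c) (o, d)).1.drop n
          = (l.foldl (pvDirStep grid rows cols r c) (q, d)).1 ∧
      n ≤ (l.foldl (pvDirStep grid rows cols r c) (o, d)).1.length := by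
  induction l with
  | nil =>
      intro o q d n hn hq
      exact ⟨rfl, hq.symm, hn⟩
  | cons dd rest ih =>
      intro o q d n hn hq
      simp only [List.foldl_cons]
      by_cases hc : 0 ≤ r + dd.1 ∧ r + dd.1 < rows ∧ 0 ≤ c + dd.2 ∧ c + dd.2 < cols ∧
          pvCellI grid (r + dd.1) (c + dd.2) ≠ '#' ∧ d.contains (r + dd.1, c + dd.2) = false
      · have ho : pvDirStep grid rows cols r c (o, d) dd
            = (o ++ [(r + dd.1, c + dd.2)],
               d.insert (r + dd.1, c + dd.2) (d.getD (r, c) 0 + 1)) := by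
          simp [pvDirStep, hc]
        have hq' : pvDirStep grid rows cols r c (q, d) dd
            = (q ++ [(r + dd.1, c + dd.2)],
               d.insert (r + dd.1, c + dd.2) (d.getD (r, c) 0 + 1)) := by
          simp [pvDirStep, hc]
        rw [ho, hq']
        exact ih _ _ _ n (by simp; omega)
          (by rw [List.drop_append_of_le_length hn, hq])
      · have ho : pvDirStep grid rows cols r c (o, d) dd = (o, d) := by
          simp only [pvDirStep]
          rw [if_neg hc]
        have hq' : pvDirStep grid rows cols r c (q, d) dd = (q, d) := by
          simp only [pvDirStep]
          rw [if_neg hc]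
        rw [ho, hq']
        exact ih o q d n hn hq

theorem pv_bfs_loop_eq (grid : List String) (rows cols : Int) :
    ∀ (fuel : Nat) (order : List (Int × Int)) (i : Nat) (dist : PySem.Dict (Int × Int) Int),
      i ≤ order.length →
      pvBfsBLoop grid rows cols fuel order i dist
        = pvBfsLoop grid rows cols fuel (order.drop i) dist := by
  intro fuel
  induction fuel with
  | zero => intro order i dist _; rfl
  | succ fuel ih =>
      intro order i dist hi
      rcases hdrop : order.drop i with _ | ⟨⟨r, c⟩, rest⟩
      · have hlen : order.length ≤ i := by
          have := congrArg List.length hdrop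
          simp at this; omega
        have hget : PySem.List.pyGet? order (i : Int) = none := by
          rw [PySem.List.pyGet?_natCast]
          exact List.getElem?_eq_none hlen
        simp [pvBfsBLoop, pvBfsLoop, hget]
      · have hilt : i < order.length := by
          have := congrArg List.length hdrop
          simp at this; omega
        have hget : PySem.List.pyGet? order (i : Int) = some (r, c) := by
          have h0 : (List.drop i order)[0]? = order[i + 0]? := List.getElem?_drop
          rw [hdrop] at h0
          rw [PySem.List.pyGet?_natCast]
          simpa using h0.symm
        have hrest : rest = order.drop (i + 1) := by
          have h1 := congrArg List.tail hdrop
          simp only [List.tail_drop] at h1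
          exact h1.symm
        obtain ⟨h2, h1, hlen⟩ := pv_fold_dirs_shift grid rows cols r c
          [((1:Int),(0:Int)),(-1,0),(0,1),(0,-1)] order rest dist (i + 1)
          (by omega) hrest
        rw [pvBfsBLoop, hget]
        show pvBfsBLoop grid rows cols fuel
            ([((1:Int),(0:Int)),(-1,0),(0,1),(0,-1)].foldl (pvDirStep grid rows cols r c) (order, dist)).1 (i + 1)
            ([((1:Int),(0:Int)),(-1,0),(0,1),(0,-1)].foldl (pvDirStep grid rows cols r c) (order, dist)).2
          = pvBfsLoop grid rows cols fuel
            ([((1:Int),(0:Int)),(-1,0),(0,1),(0,-1)].foldl (pvDirStep grid rows cols r c) (rest, dist)).1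
            ([((1:Int),(0:Int)),(-1,0),(0,1),(0,-1)].foldl (pvDirStep grid rows cols r c) (rest, dist)).2
        rw [ih _ (i + 1) _ hlen, h1, h2]

theorem pv_bfsB_eq (grid : List String) (start : Int × Int) :
    pvBfsB grid start = pvBfs grid start := by
  unfold pvBfsB pvBfs
  exact pv_bfs_loop_eq grid _ _ _ [start] 0 _ (by simp)

-- ---- matrix rows: the abort-early fold equals build-then-check ----
def pvRowA (grid : List String) (p : Int × Int) : List Int :=
  (pvPoints grid).map (fun q => (pvBfs grid p).getD q (-1))

theorem pv_rowsB_fold (grid : List String) :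
    ∀ (l : List (Int × Int)) (rs : List (List Int)),
      (l.foldl (fun acc p =>
        match acc with
        | none => none
        | some rs =>
            let ds := pvBfsB grid p
            let row := (pvPoints grid).map (fun q => ds.getD q (-1))
            if row.contains (-1) then none else some (rs ++ [row])) (some rs))
      = (if l.any (fun p => (pvRowA grid p).contains (-1)) then none
         else some (rs ++ l.map (pvRowA grid))) := by
  intro l
  induction l with
  | nil => intro rs; simp
  | cons p rest ih =>
      intro rs
      have hnone : ∀ m : List (Int × Int),
          (m.foldl (fun acc p =>
            match acc with
            | none => none
            | some rs =>
                let ds := pvBfsB grid p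
                let row := (pvPoints grid).map (fun q => ds.getD q (-1))
                if row.contains (-1) then none else some (rs ++ [row]))
            (none : Option (List (List Int)))) = none := by
        intro m; induction m with
        | nil => rfl
        | cons x xs ihm => simpa using ihm
      simp only [List.foldl_cons, List.any_cons, List.map_cons]
      rw [pv_bfsB_eq]
      by_cases hp : (pvRowA grid p).contains (-1)
      · have hp' : ((pvPoints grid).map
            (fun q => (pvBfs grid p).getD q (-1))).contains (-1) = true := hp
        rw [if_pos hp', hnone rest, if_pos (by rw [hp]; simp)]
      · have hrow : pvRowA grid p
            = (pvPoints grid).map (fun q => (pvBfs grid p).getD q (-1)) := rfl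
        have hp2 : (pvRowA grid p).contains (-1) = false := Bool.eq_false_iff.mpr hp
        rw [if_neg (by rw [← hrow, hp2]; simp), ih, ← hrow]
        rw [hp2, Bool.false_or, List.append_assoc, List.singleton_append]

theorem pv_rowsB_eq (grid : List String) :
    pvRowsB grid (pvPoints grid)
      = (if pvHasNeg (pvMatrix grid) then none else some (pvMatrix grid)) := by
  unfold pvRowsB
  rw [pv_rowsB_fold grid (pvPoints grid) []]
  have hmat : pvMatrix grid = (pvPoints grid).map (pvRowA grid) := by
    unfold pvMatrix pvRowA; rfl
  have hneg : pvHasNeg (pvMatrix grid)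
      = (pvPoints grid).any (fun p => (pvRowA grid p).contains (-1)) := by
    rw [hmat]
    unfold pvHasNeg
    rw [List.any_map]
    apply congrArg
    funext p
    simp only [Function.comp]
    exact List.any_beq'
  rw [hneg, hmat]
  simp

-- ---- DP: bit-arithmetic helpers ----
theorem pv_tb_or_self {m j : Nat} : (m ||| (1 <<< j)).testBit j = true := by
  simp [Nat.testBit_or, Nat.one_shiftLeft]

theorem pv_or_xor_cancel {m j : Nat} (h : m.testBit j = false) :
    (m ||| (1 <<< j)) ^^^ (1 <<< j) = m := by
  apply Nat.eq_of_testBit_eq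
  intro x
  by_cases hx : x = j
  · subst hx; simp [Nat.testBit_xor, Nat.testBit_or, Nat.one_shiftLeft, h]
  · simp [Nat.testBit_xor, Nat.testBit_or, Nat.one_shiftLeft,
      Nat.testBit_two_pow_of_ne (Ne.symm hx)]

theorem pv_or_ne {m j : Nat} (h : m.testBit j = false) : m ||| (1 <<< j) ≠ m := by
  intro he
  have := pv_tb_or_self (m := m) (j := j)
  rw [he, h] at this
  exact absurd this (by simp)

theorem pv_xor_lt {m i : Nat} (h : m.testBit i = true) : m ^^^ (1 <<< i) < m := by
  have hf : Nat.testBit (m ^^^ (1 <<< i)) i = false := by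
    simp [Nat.testBit_xor, h, Nat.one_shiftLeft]
  exact Nat.lt_of_testBit i hf h (fun j hj => by
    simp [Nat.testBit_xor, Nat.one_shiftLeft, Nat.testBit_two_pow_of_ne (Nat.ne_of_lt hj)])

theorem pv_xor_eq_or {m j : Nat} (h : m.testBit j = false) :
    m ^^^ (1 <<< j) = m ||| (1 <<< j) := by
  apply Nat.eq_of_testBit_eq
  intro x
  by_cases hx : x = j
  · subst hx; simp [Nat.testBit_xor, Nat.testBit_or, Nat.one_shiftLeft, h]
  · simp [Nat.testBit_xor, Nat.testBit_or, Nat.one_shiftLeft,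
      Nat.testBit_two_pow_of_ne (Ne.symm hx)]

theorem pv_solve_ne_INF {d : Nat → Nat → Int} {k m i : Nat}
    (h : pvSolve d k m i ≠ pvINF) : m.testBit i = true := by
  by_cases h0 : i = 0
  · subst h0
    rw [pvSolve] at h
    by_cases h1 : m = 1
    · subst h1; decide
    · simp [h1] at h
  · rw [pvSolve] at h
    by_cases hb : m.testBit i
    · exact hb
    · simp [h0, hb] at h

-- the invariant after the bottom-up sweep has processed the masks below m
def pvInv (d : Nat → Nat → Int) (k m : Nat) (dp : PvTbl) : Prop :=
  ∀ M i, i < k →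
    dp.get M i =
      if i ≠ 0 ∧ M.testBit i ∧ M ^^^ (1 <<< i) < m then pvSolve d k M i else pvDp0.get M i

theorem pv_row_final {d : Nat → Nat → Int} {k m : Nat} {dp : PvTbl}
    (h : pvInv d k m dp) : ∀ i, i < k → dp.get m i = pvSolve d k m i := by
  intro i hi
  rw [h m i hi]
  by_cases h0 : i = 0
  · subst h0
    rw [pvSolve]
    simp [pvDp0]
  · by_cases hb : m.testBit i
    · simp [h0, hb, pv_xor_lt hb]
    · rw [pvSolve]
      simp [h0, hb, pvDp0]

theorem pv_relax_fold (d : Nat → Nat → Int) (m i : Nat) (js : List Nat) (hnd : js.Nodup)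
    (dp : PvTbl) :
    ∀ M x, (js.foldl (pvRelax d m i) dp).get M x =
      if x ∈ js ∧ m.testBit x = false ∧ M = m ||| (1 <<< x) then
        (if dp.get m i + d i x < dp.get M x then dp.get m i + d i x else dp.get M x)
      else dp.get M x := by
  induction js generalizing dp with
  | nil => intro M x; simp
  | cons j rest ih =>
      intro M x
      have hj : j ∉ rest := (List.nodup_cons.mp hnd).1
      have hrest : rest.Nodup := (List.nodup_cons.mp hnd).2
      have happ : ∀ M' x', (pvRelax d m i dp j).get M' x' =
          if Nat.testBit m j then dp.get M' x'
          else if dp.get m i + d i j < dp.get (m ||| (1 <<< j)) j then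
            (if M' = m ||| (1 <<< j) ∧ x' = j then dp.get m i + d i j else dp.get M' x')
          else dp.get M' x' := by
        intro M' x'
        unfold pvRelax
        rw [apply_ite (fun t : PvTbl => t.get M' x')]
        rw [apply_ite (fun t : PvTbl => t.get M' x')]
      have fact2 : ∀ M' x', x' ≠ j → (pvRelax d m i dp j).get M' x' = dp.get M' x' := by
        intro M' x' hne
        rw [happ]
        split_ifs with h1 h2 h3
        · rfl
        · exact absurd h3.2 hne
        · rfl
        · rfl
      have fact1 : ∀ i', (pvRelax d m i dp j).get m i' = dp.get m i' := by
        intro i'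
        rw [happ]
        split_ifs with h1 h2 h3
        · rfl
        · exact absurd h3.1.symm (pv_or_ne (by simpa using h1))
        · rfl
        · rfl
      have fact3 : ∀ M', (pvRelax d m i dp j).get M' j =
          if m.testBit j = false ∧ M' = m ||| (1 <<< j) then
            (if dp.get m i + d i j < dp.get M' j then dp.get m i + d i j else dp.get M' j)
          else dp.get M' j := by
        intro M'
        rw [happ]
        by_cases htb : m.testBit j
        · simp [htb]
        · have htb' : m.testBit j = false := by simpa using htb
          by_cases hM : M' = m ||| (1 <<< j)
          · subst hM
            simp [htb']
          · simp [htb', hM]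
      rw [List.foldl_cons, ih hrest]
      by_cases hxr : x ∈ rest
      · have hxj : x ≠ j := fun he => hj (he ▸ hxr)
        rw [fact2 M x hxj, fact1 i]
        simp [hxr, hxj]
      · by_cases hxj : x = j
        · subst hxj
          rw [if_neg (by simp [hxr]), fact3 M]
          simp
        · rw [fact2 M x hxj]
          simp [hxr, hxj]

def pvMinFold (d : Nat → Nat → Int) (m x : Nat) (dp : PvTbl) (b : Int)
    (is : List Nat) : Int :=
  is.foldl (fun best i =>
    if dp.get m i = pvINF then best
    else if dp.get m i + d i x < best then dp.get m i + d i x else best) b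

theorem pv_stepI_fold (d : Nat → Nat → Int) (k m : Nat) (is : List Nat)
    (dp : PvTbl) :
    ∀ M x, (is.foldl (pvStepI d k m) dp).get M x =
      if 1 ≤ x ∧ x < k ∧ m.testBit x = false ∧ M = m ||| (1 <<< x) then
        pvMinFold d m x dp (dp.get M x) is
      else dp.get M x := by
  induction is generalizing dp with
  | nil => intro M x; simp [pvMinFold]
  | cons i rest ih =>
      intro M x
      have hmem : ∀ y : Nat, y ∈ List.range' 1 (k - 1) ↔ 1 ≤ y ∧ y < k := by
        intro y; rw [List.mem_range'_1]; omega
      have dp1eq : ∀ M' x', (pvStepI d k m dp i).get M' x' =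
          if 1 ≤ x' ∧ x' < k ∧ m.testBit x' = false ∧ M' = m ||| (1 <<< x') then
            (if dp.get m i = pvINF then dp.get M' x'
             else if dp.get m i + d i x' < dp.get M' x' then dp.get m i + d i x' else dp.get M' x')
          else dp.get M' x' := by
        intro M' x'
        unfold pvStepI
        by_cases hINF : dp.get m i = pvINF
        · rw [if_pos hINF]
          simp [hINF]
        · rw [if_neg hINF, pv_relax_fold d m i _ (List.nodup_range') dp M' x']
          by_cases hc : 1 ≤ x' ∧ x' < k ∧ m.testBit x' = false ∧ M' = m ||| (1 <<< x')
          · rw [if_pos ⟨(hmem x').mpr ⟨hc.1, hc.2.1⟩, hc.2.2⟩, if_pos hc, if_neg hINF]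
          · rw [if_neg (fun hc' => hc ⟨((hmem x').mp hc'.1).1, ((hmem x').mp hc'.1).2, hc'.2⟩),
              if_neg hc]
      have dp1row : ∀ i', (pvStepI d k m dp i).get m i' = dp.get m i' := by
        intro i'
        rw [dp1eq, if_neg (fun hc => pv_or_ne hc.2.2.1 hc.2.2.2.symm)]
      rw [List.foldl_cons, ih (pvStepI d k m dp i) M x]
      split_ifs with hc
      · unfold pvMinFold
        simp only [dp1row]
        rw [List.foldl_cons]
        congr 1
        rw [dp1eq, if_pos hc]
      · rw [dp1eq, if_neg hc]

theorem pv_minfold_eq_solve (d : Nat → Nat → Int) (k m x : Nat) (dp : PvTbl)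
    (hrow : ∀ i, i < k → dp.get m i = pvSolve d k m i) (hx0 : x ≠ 0)
    (hxm : m.testBit x = false) :
    pvMinFold d m x dp pvINF (List.range k) = pvSolve d k (m ||| (1 <<< x)) x := by
  rw [pvSolve, if_neg hx0, dif_pos (pv_tb_or_self (m := m) (j := x))]
  simp only [pv_or_xor_cancel hxm]
  unfold pvMinFold
  apply List.foldl_ext
  intro best i' hi'
  have hik : i' < k := List.mem_range.mp hi'
  rw [hrow i' hik]
  by_cases htb' : m.testBit i'
  · simp [htb']
  · have hINF : pvSolve d k m i' = pvINF := by
      by_contra hne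
      rw [pv_solve_ne_INF hne] at htb'
      exact htb' rfl
    simp [htb', hINF]

theorem pv_inv_step {d : Nat → Nat → Int} {k m : Nat} {dp : PvTbl}
    (h : pvInv d k m dp) : pvInv d k (m + 1) (pvStepMask d k dp m) := by
  intro M x hx
  unfold pvStepMask
  rw [pv_stepI_fold d k m (List.range k) dp M x]
  by_cases hS : 1 ≤ x ∧ x < k ∧ m.testBit x = false ∧ M = m ||| (1 <<< x)
  · rw [if_pos hS]
    obtain ⟨hx1, hxk, htb, hM⟩ := hS
    subst hM
    have hdpMx : dp.get (m ||| (1 <<< x)) x = pvINF := by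
      rw [h _ x hx, if_neg (fun hc => by
        rw [pv_or_xor_cancel htb] at hc
        exact Nat.lt_irrefl m hc.2.2)]
      show (if m ||| (1 <<< x) = 1 ∧ x = 0 then (0 : Int) else pvINF) = pvINF
      rw [if_neg (fun hc => by omega)]
    rw [hdpMx, pv_minfold_eq_solve d k m x dp (pv_row_final h) (by omega) htb]
    rw [if_pos ⟨by omega, pv_tb_or_self, by rw [pv_or_xor_cancel htb]; omega⟩]
  · rw [if_neg hS, h M x hx]
    have hCC : (x ≠ 0 ∧ M.testBit x ∧ M ^^^ (1 <<< x) < m) ↔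
        (x ≠ 0 ∧ M.testBit x ∧ M ^^^ (1 <<< x) < m + 1) := by
      constructor
      · rintro ⟨a, b, c⟩; exact ⟨a, b, Nat.lt_succ_of_lt c⟩
      · rintro ⟨a, b, c⟩
        refine ⟨a, b, ?_⟩
        rcases Nat.lt_succ_iff_lt_or_eq.mp c with hlt | heq
        · exact hlt
        · exfalso
          have htbm : m.testBit x = false := by
            have hz : (M ^^^ (1 <<< x)).testBit x = false := by
              simp [Nat.testBit_xor, Nat.one_shiftLeft, b]
            rw [heq] at hz
            exact hz
          have hMe : M = m ||| (1 <<< x) := by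
            have h1 : M = m ^^^ (1 <<< x) := by
              rw [← heq, Nat.xor_assoc, Nat.xor_self, Nat.xor_zero]
            rw [h1, pv_xor_eq_or htbm]
          exact hS ⟨by omega, hx, htbm, hMe⟩
    simp only [hCC]

theorem pv_inv_all (d : Nat → Nat → Int) (k : Nat) :
    ∀ n, pvInv d k n ((List.range n).foldl (pvStepMask d k) pvDp0) := by
  intro n
  induction n with
  | zero =>
      intro M i hi
      simp [pvDp0]
  | succ n ih =>
      rw [List.range_succ, List.foldl_append]
      exact pv_inv_step ih

theorem pv_dpF_eq_solve (d : Nat → Nat → Int) (k i : Nat) (hi : i < k) :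
    (pvDpF d k).get ((1 <<< k) - 1) i = pvSolve d k ((1 <<< k) - 1) i := by
  unfold pvDpF
  rw [pv_inv_all d k (1 <<< k) ((1 <<< k) - 1) i hi]
  by_cases h0 : i = 0
  · subst h0
    rw [if_neg (fun hc => hc.1 rfl)]
    rw [pvSolve]
    simp [pvDp0]
  · have htb : ((1 <<< k) - 1).testBit i = true := by
      simp [Nat.one_shiftLeft, Nat.testBit_two_pow_sub_one, hi]
    have hlt : ((1 <<< k) - 1) ^^^ (1 <<< i) < 1 <<< k :=
      lt_trans (pv_xor_lt htb) (Nat.sub_lt (by simp [Nat.one_shiftLeft]) one_pos)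
    rw [if_pos ⟨h0, htb, hlt⟩]

-- ===== VERDICT (by name: the statement is the Claim_ definition above) =====
theorem shortest_path_collect_all_spec : Claim_equal_shortest_path_collect_all := by
  intro grid _ _
  unfold Spec_shortest_path_collect_all shortest_path_collect_all shortest_path_collect_all_alt
  simp only [pv_rowsB_eq]
  by_cases hneg : pvHasNeg (pvMatrix grid)
  · simp [hneg]
  · simp only [hneg, if_false, Bool.false_eq_true]
    congr 2
    refine List.map_congr_left ?_
    intro i hi
    exact pv_dpF_eq_solve _ _ i (List.mem_range.mp hi)
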